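-- pv_equiv track=rewrite | github.com/andreyberdov72/mesh-project | openwrt-generator/generate_configs.py | build_ethernet_ports
-- ===== SOURCE A (Python) =====
-- from collections import defaultdict
--
-- def build_ethernet_ports(nodes, links):
--     """
--     Визначає, які Ethernet-порти потрібно активувати на кожному вузлі,
--     ґрунтуючись на топології синіх (дротових) зв'язків.
--
--     Args:
--         nodes: Список словників із даними про вузли (ключ "id").
--         links: Список словників зв'язків (ключі "source", "target", "color").
--
--     Returns:
--         Словник, де ключ — id вузла, значення — список номерів портів,
--         які треба активувати (нумерація з 1). Якщо вузол не має дротових сусідів,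
--         повертає порожній список.
--
--     Example:
--         >>> nodes = [{"id": "A1"}, {"id": "A2"}]
--         >>> links = [{"source": "A1", "target": "A2", "color": "blue"}]
--         >>> build_ethernet_ports(nodes, links)
--         {'A1': [1], 'A2': [1]}
--     """
--     eth_links = [link for link in links if link["color"] == "blue"]
--     graph = defaultdict(list)
--     for link in eth_links:
--         graph[link["source"]].append(link["target"])
--         graph[link["target"]].append(link["source"])
--
--     node_ports = {}
--     for node in nodes:
--         node_id = node["id"]
--         neighbors = graph.get(node_id, [])
--         active_ports = list(range(1, len(neighbors) + 1))
--         node_ports[node_id] = active_ports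
--     return node_ports
-- ===== SOURCE B (Python) =====
-- def build_ethernet_ports(nodes, links):
--     node_ports = {}
--     for node in nodes:
--         node_ports[node["id"]] = []
--     for link in links:
--         if link["color"] == "blue":
--             for endpoint in (link["source"], link["target"]):
--                 if endpoint in node_ports:
--                     ports = node_ports[endpoint]
--                     ports.append(len(ports) + 1)
--     return node_ports
-- ===== Notes on version B (the rewrite author's own statement) =====
-- stated objective: simpler
-- what changed: B never builds the adjacency list of neighbor identities: it initializes every node's port list to empty and, in a single pass over the blue links, appends the next port number directly to each endpoint that is a known node.
import Mathlib
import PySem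

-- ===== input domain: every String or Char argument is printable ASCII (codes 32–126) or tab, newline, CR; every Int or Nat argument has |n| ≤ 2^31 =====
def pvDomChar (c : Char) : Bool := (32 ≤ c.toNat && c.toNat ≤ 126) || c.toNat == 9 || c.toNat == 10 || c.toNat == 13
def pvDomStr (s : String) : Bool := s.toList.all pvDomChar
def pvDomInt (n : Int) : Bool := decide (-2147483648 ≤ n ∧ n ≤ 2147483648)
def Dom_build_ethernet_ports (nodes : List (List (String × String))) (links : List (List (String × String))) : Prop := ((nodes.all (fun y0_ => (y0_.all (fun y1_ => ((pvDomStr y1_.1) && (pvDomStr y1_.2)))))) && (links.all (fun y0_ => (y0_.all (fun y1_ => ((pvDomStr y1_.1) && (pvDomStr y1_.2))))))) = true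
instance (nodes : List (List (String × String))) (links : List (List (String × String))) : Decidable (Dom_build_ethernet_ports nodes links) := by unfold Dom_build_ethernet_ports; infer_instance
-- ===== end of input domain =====

-- B builds each node's port list directly in one pass over the blue links (no adjacency
-- list of neighbor identities is ever constructed); objective: simpler.

-- ===== PORT A =====
-- dicts in the input are association lists; Python's d["k"] is the first match (List.lookup),
-- total here via getD "" — Pre_ excludes the inputs where Python raises KeyError.
def build_ethernet_ports (nodes : List (List (String × String))) (links : List (List (String × String))) : List (String × List Int) :=
  let eth_links := links.filter (fun link => (link.lookup "color").getD "" == "blue")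
  let graph := eth_links.foldl (fun g link =>
      (g.modify ((link.lookup "source").getD "") [] (fun ns => ns ++ [(link.lookup "target").getD ""])).modify
        ((link.lookup "target").getD "") [] (fun ns => ns ++ [(link.lookup "source").getD ""]))
    (PySem.Dict.empty : PySem.Dict String (List String))
  let node_ports := nodes.foldl (fun d node =>
      d.insert ((node.lookup "id").getD "")
        (PySem.List.pyRange 1 (((graph.getD ((node.lookup "id").getD "") []).length : Int) + 1)))
    (PySem.Dict.empty : PySem.Dict String (List Int))
  node_ports.items

-- ===== PORT B =====
def build_ethernet_ports_alt (nodes : List (List (String × String))) (links : List (List (String × String))) : List (String × List Int) :=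
  let np0 := nodes.foldl (fun d node => d.insert ((node.lookup "id").getD "") ([] : List Int))
    (PySem.Dict.empty : PySem.Dict String (List Int))
  let np := links.foldl (fun d link =>
      if (link.lookup "color").getD "" == "blue" then
        [(link.lookup "source").getD "", (link.lookup "target").getD ""].foldl
          (fun d e => if d.contains e then d.modify e [] (fun ps => ps ++ [(ps.length : Int) + 1]) else d) d
      else d) np0
  np.items

-- ===== PRECONDITION & SPEC =====
-- Pre_ excludes exactly the inputs where Python A raises KeyError: a node dict without "id",
-- a link dict without "color", or a blue link without "source"/"target" (B raises there too).
def Pre_build_ethernet_ports (nodes : List (List (String × String))) (links : List (List (String × String))) : Prop :=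
  (∀ n ∈ nodes, (n.lookup "id").isSome = true) ∧
  (∀ l ∈ links, (l.lookup "color").isSome = true ∧
    ((l.lookup "color") = some "blue" → (l.lookup "source").isSome = true ∧ (l.lookup "target").isSome = true))
instance (nodes : List (List (String × String))) (links : List (List (String × String))) : Decidable (Pre_build_ethernet_ports nodes links) := by unfold Pre_build_ethernet_ports; infer_instance

def pvWitness_build_ethernet_ports : (List (List (String × String))) × (List (List (String × String))) :=
  ([[("id", "A1")], [("id", "A2")]], [[("source", "A1"), ("target", "A2"), ("color", "blue")]])

def Spec_build_ethernet_ports (nodes : List (List (String × String))) (links : List (List (String × String))) (out : List (String × List Int)) : Prop := out = build_ethernet_ports_alt nodes links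
instance (nodes : List (List (String × String))) (links : List (List (String × String))) (out : List (String × List Int)) : Decidable (Spec_build_ethernet_ports nodes links out) := by unfold Spec_build_ethernet_ports; infer_instance

-- ===== CLAIM (what is proved, stated in full; the proofs are below) =====
def Claim_equal_build_ethernet_ports : Prop := ∀ (nodes : List (List (String × String))) (links : List (List (String × String))), Dom_build_ethernet_ports nodes links → Pre_build_ethernet_ports nodes links → Spec_build_ethernet_ports nodes links (build_ethernet_ports nodes links)

-- ===== LEMMAS AND PROOFS =====

-- field accessors (first match, '' if absent — only reached outside Pre_)
def pvNid (n : List (String × String)) : String := (n.lookup "id").getD ""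
def pvSrc (l : List (String × String)) : String := (l.lookup "source").getD ""
def pvTgt (l : List (String × String)) : String := (l.lookup "target").getD ""
def pvBlue (l : List (String × String)) : Bool := (l.lookup "color").getD "" == "blue"

-- list(range(1, n+1))
def pvRng (n : Nat) : List Int := PySem.List.pyRange 1 ((n : Int) + 1)

-- endpoint occurrences of k in one link / in the blue links of a list
def pvCntL (l : List (String × String)) (k : String) : Nat :=
  (if k = pvSrc l then 1 else 0) + (if k = pvTgt l then 1 else 0)
def pvCnt (L : List (List (String × String))) (k : String) : Nat :=
  ((L.filter pvBlue).map (fun l => pvCntL l k)).sum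

-- the canonical dict: keys S (in order), value at k = list(range(1, f k + 1))
def pvMkMap (S : List String) (f : String → Nat) : PySem.Dict String (List Int) :=
  ⟨S.map (fun k => (k, pvRng (f k)))⟩

theorem pvRng_succ (n : Nat) : pvRng (n + 1) = pvRng n ++ [(n : Int) + 1] := by
  have h := PySem.List.pyRange_one_succ_right (a := 1) (b := (n : Int) + 1) (by omega)
  simpa [pvRng, push_cast, add_comm, add_assoc, add_left_comm] using h

theorem pvRng_len (n : Nat) : (pvRng n).length = n := by
  induction n with
  | zero => rfl
  | succ n ih => rw [pvRng_succ]; simp [ih]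

theorem pvGetD_mkMap (S : List String) (f : String → Nat) (k : String) :
    (pvMkMap S f).getD k [] = if k ∈ S then pvRng (f k) else [] := by
  induction S with
  | nil => rfl
  | cons a S ih =>
    by_cases hak : a = k
    · subst hak
      simp [pvMkMap, PySem.Dict.getD_eq_get?_getD, PySem.Dict.get?_mk_cons]
    · have hb : (a == k) = false := by simp [hak]
      simp only [pvMkMap, List.map_cons, PySem.Dict.getD_eq_get?_getD, PySem.Dict.get?_mk_cons,
        hb, Bool.false_eq_true, if_false, List.mem_cons]
      rw [← PySem.Dict.getD_eq_get?_getD,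
        show ({ items := S.map (fun k => (k, pvRng (f k))) } : PySem.Dict String (List Int))
          = pvMkMap S f from rfl, ih]
      have hka : ¬ k = a := fun h => hak h.symm
      simp [hka]

theorem pvContains_mkMap (S : List String) (f : String → Nat) (k : String) :
    (pvMkMap S f).contains k = decide (k ∈ S) := by
  induction S with
  | nil => rfl
  | cons a S ih =>
    have hstep : (pvMkMap (a :: S) f).contains k = ((a == k) || (pvMkMap S f).contains k) := rfl
    rw [hstep, ih]
    by_cases hak : a = k
    · simp [hak]
    · have hka : ¬ k = a := fun h => hak h.symm
      simp [hak, hka]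

theorem pvMkMap_congr (S : List String) (f g : String → Nat)
    (h : ∀ k ∈ S, f k = g k) : pvMkMap S f = pvMkMap S g := by
  apply PySem.Dict.ext
  simp only [pvMkMap]
  exact List.map_congr_left (fun k hk => by rw [h k hk])

theorem pvInsert_mkMap (S : List String) (f : String → Nat) (k : String) :
    (pvMkMap S f).insert k (pvRng (f k)) = pvMkMap (PySem.Set.add S k) f := by
  by_cases hk : k ∈ S
  · have hc : (pvMkMap S f).contains k = true := by simp [pvContains_mkMap, hk]
    apply PySem.Dict.ext
    rw [PySem.Dict.items_insert_of_contains _ _ hc]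
    simp only [pvMkMap, PySem.Set.add_of_mem hk, List.map_map]
    apply List.map_congr_left
    intro a _
    by_cases hak : a = k <;> simp [hak]
  · have hc : (pvMkMap S f).contains k = false := by simp [pvContains_mkMap, hk]
    apply PySem.Dict.ext
    rw [PySem.Dict.items_insert_of_not_contains _ _ hc]
    simp [pvMkMap, PySem.Set.add_of_not_mem hk]

theorem pvModify_mkMap (S : List String) (f : String → Nat) (k : String) (hk : k ∈ S) :
    (pvMkMap S f).modify k [] (fun ps => ps ++ [(ps.length : Int) + 1])
      = pvMkMap S (fun j => if j = k then f j + 1 else f j) := by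
  have hget : (pvMkMap S f).getD k [] = pvRng (f k) := by rw [pvGetD_mkMap]; simp [hk]
  have hval : pvRng (f k) ++ [((pvRng (f k)).length : Int) + 1] = pvRng (f k + 1) := by
    rw [pvRng_succ, pvRng_len]
  have hmod : (pvMkMap S f).modify k [] (fun ps => ps ++ [(ps.length : Int) + 1])
      = (pvMkMap S f).insert k (pvRng (f k) ++ [((pvRng (f k)).length : Int) + 1]) := by
    show (pvMkMap S f).insert k ((fun ps => ps ++ [(ps.length : Int) + 1]) ((pvMkMap S f).getD k [])) = _
    rw [hget]
  rw [hmod, hval]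
  have hc : (pvMkMap S f).contains k = true := by simp [pvContains_mkMap, hk]
  apply PySem.Dict.ext
  rw [PySem.Dict.items_insert_of_contains _ _ hc]
  simp only [pvMkMap, List.map_map]
  apply List.map_congr_left
  intro a _
  by_cases hak : a = k <;> simp [hak]

-- A's graph fold: the neighbor list at k grows by the endpoint count of each blue link
theorem pvGraph_len (eth : List (List (String × String))) :
    ∀ (g : PySem.Dict String (List String)) (k : String),
    ((eth.foldl (fun g link =>
        (g.modify (pvSrc link) [] (fun ns => ns ++ [pvTgt link])).modify
          (pvTgt link) [] (fun ns => ns ++ [pvSrc link])) g).getD k []).length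
      = ((g.getD k []).length + (eth.map (fun l => pvCntL l k)).sum) := by
  induction eth with
  | nil => intro g k; simp
  | cons l rest ih =>
    intro g k
    simp only [List.foldl_cons, List.map_cons, List.sum_cons]
    rw [ih]
    simp only [PySem.Dict.getD_modify]
    by_cases h1 : k = pvTgt l <;> by_cases h2 : k = pvSrc l <;>
      simp [h1, h2, pvCntL] at * <;> simp [h1, h2] <;> omega

-- a fold inserting (id ↦ pvRng (f id)) over nodes, starting from a canonical dict
theorem pvFoldl_nodes (f : String → Nat) (ns : List (List (String × String))) :
    ∀ S : List String,
    ns.foldl (fun d node => d.insert (pvNid node) (pvRng (f (pvNid node)))) (pvMkMap S f)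
      = pvMkMap (PySem.Set.update S (ns.map pvNid)) f := by
  induction ns with
  | nil => intro S; simp [PySem.Set.update]
  | cons n rest ih =>
    intro S
    simp only [List.foldl_cons, List.map_cons, PySem.Set.update_cons]
    rw [pvInsert_mkMap, ih]

-- B's per-endpoint and per-link steps
def pvStep2 (d : PySem.Dict String (List Int)) (e : String) : PySem.Dict String (List Int) :=
  if d.contains e then d.modify e [] (fun ps => ps ++ [(ps.length : Int) + 1]) else d
def pvStepB (d : PySem.Dict String (List Int)) (link : List (String × String)) : PySem.Dict String (List Int) :=
  if pvBlue link then pvStep2 (pvStep2 d (pvSrc link)) (pvTgt link) else d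

theorem pvStep2_mkMap (S : List String) (c : String → Nat) (e : String) :
    pvStep2 (pvMkMap S c) e = pvMkMap S (fun k => c k + (if k = e then 1 else 0)) := by
  unfold pvStep2
  by_cases he : e ∈ S
  · rw [if_pos (by simp [pvContains_mkMap, he]), pvModify_mkMap S c e he]
    exact pvMkMap_congr _ _ _ (fun j _ => by by_cases hj : j = e <;> simp [hj])
  · rw [if_neg (by simp [pvContains_mkMap, he])]
    exact pvMkMap_congr _ _ _ (fun j hj => by
      have : j ≠ e := fun h => he (h ▸ hj)
      simp [this])

-- B's link fold adds the blue endpoint counts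
theorem pvFoldl_links (L : List (List (String × String))) :
    ∀ (S : List String) (c : String → Nat),
    L.foldl pvStepB (pvMkMap S c) = pvMkMap S (fun k => c k + pvCnt L k) := by
  induction L with
  | nil => intro S c; simp [pvCnt]
  | cons l rest ih =>
    intro S c
    simp only [List.foldl_cons]
    by_cases hb : pvBlue l
    · have hacc : pvStepB (pvMkMap S c) l
          = pvMkMap S (fun k => (c k + if k = pvSrc l then 1 else 0) + if k = pvTgt l then 1 else 0) := by
        unfold pvStepB
        rw [if_pos hb, pvStep2_mkMap S c (pvSrc l), pvStep2_mkMap S _ (pvTgt l)]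
      rw [hacc, ih]
      apply pvMkMap_congr
      intro k _
      simp only [pvCnt, List.filter_cons, hb, if_pos, List.map_cons, List.sum_cons, pvCntL]
      omega
    · have hacc : pvStepB (pvMkMap S c) l = pvMkMap S c := by unfold pvStepB; rw [if_neg hb]
      rw [hacc, ih]
      apply pvMkMap_congr
      intro k _
      simp [pvCnt, hb]

def pvGraphA (links : List (List (String × String))) : PySem.Dict String (List String) :=
  (links.filter pvBlue).foldl (fun g link =>
    (g.modify (pvSrc link) [] (fun ns => ns ++ [pvTgt link])).modify
      (pvTgt link) [] (fun ns => ns ++ [pvSrc link])) PySem.Dict.empty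

def pvFA (links : List (List (String × String))) (k : String) : Nat :=
  ((pvGraphA links).getD k []).length

theorem pvA_char (nodes links : List (List (String × String))) :
    build_ethernet_ports nodes links
      = (pvMkMap (PySem.Set.ofList (nodes.map pvNid)) (fun k => pvCnt links k)).items := by
  show (List.foldl (fun d node => d.insert (pvNid node) (pvRng (pvFA links (pvNid node))))
      (pvMkMap [] (pvFA links)) nodes).items = _
  rw [pvFoldl_nodes (pvFA links) nodes [], PySem.Set.update_nil_left]
  congr 1
  apply pvMkMap_congr
  intro k _
  unfold pvFA pvGraphA
  rw [pvGraph_len]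
  simp [pvCnt, PySem.Dict.getD_empty]

theorem pvB_char (nodes links : List (List (String × String))) :
    build_ethernet_ports_alt nodes links
      = (pvMkMap (PySem.Set.ofList (nodes.map pvNid)) (fun k => 0 + pvCnt links k)).items := by
  show (List.foldl pvStepB
      (List.foldl (fun d node => d.insert (pvNid node) (pvRng ((fun _ => 0) (pvNid node))))
        (pvMkMap [] (fun _ => 0)) nodes) links).items = _
  rw [pvFoldl_nodes (fun _ => 0) nodes [], PySem.Set.update_nil_left,
    pvFoldl_links links (PySem.Set.ofList (nodes.map pvNid)) (fun _ => 0)]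

-- ===== VERDICT (by name: the statement is the Claim_ definition above) =====
theorem build_ethernet_ports_spec : Claim_equal_build_ethernet_ports := by
  intro nodes links _ _
  unfold Spec_build_ethernet_ports
  rw [pvA_char, pvB_char]
  congr 1
  exact pvMkMap_congr _ _ _ (fun k _ => by omega)
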